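-- pv_equiv track=rewrite | github.com/Gitae-business/CodingTest | BJ_2484.py | calculate_prize
-- ===== SOURCE A (Python) =====
-- def calculate_prize(dice):
--     dice.sort()
--
--     if dice[0] == dice[3]:
--         return 50000 + dice[0] * 5000
--
--     if dice[0] == dice[2] or dice[1] == dice[3]:
--         return 10000 + dice[1] * 1000
--
--     if dice[0] == dice[1] and dice[2] == dice[3]:
--         return 2000 + dice[0] * 500 + dice[2] * 500
--
--     for i in range(3):
--         if dice[i] == dice[i+1]:
--             return 1000 + dice[i] * 100
--
--     return dice[3] * 100
-- ===== SOURCE B (Python) =====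
-- def calculate_prize(dice):
--     dice.sort()
--     top = dice[:4]
--     counts = {}
--     for v in top:
--         counts[v] = counts.get(v, 0) + 1
--     pairs = []
--     for v, k in counts.items():
--         if k == 4:
--             return 50000 + v * 5000
--         if k == 3:
--             return 10000 + v * 1000
--         if k == 2:
--             pairs.append(v)
--     if len(pairs) == 2:
--         return 2000 + (pairs[0] + pairs[1]) * 500
--     if len(pairs) == 1:
--         return 1000 + pairs[0] * 100
--     return top[3] * 100
-- ===== Notes on version B (the rewrite author's own statement) =====
-- stated objective: alternative
-- what changed: Replaces A's sorted-position comparisons and adjacent-pair scan with a frequency dict over the four smallest values, classified by its counts in one pass over the dict items.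
import Mathlib
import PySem

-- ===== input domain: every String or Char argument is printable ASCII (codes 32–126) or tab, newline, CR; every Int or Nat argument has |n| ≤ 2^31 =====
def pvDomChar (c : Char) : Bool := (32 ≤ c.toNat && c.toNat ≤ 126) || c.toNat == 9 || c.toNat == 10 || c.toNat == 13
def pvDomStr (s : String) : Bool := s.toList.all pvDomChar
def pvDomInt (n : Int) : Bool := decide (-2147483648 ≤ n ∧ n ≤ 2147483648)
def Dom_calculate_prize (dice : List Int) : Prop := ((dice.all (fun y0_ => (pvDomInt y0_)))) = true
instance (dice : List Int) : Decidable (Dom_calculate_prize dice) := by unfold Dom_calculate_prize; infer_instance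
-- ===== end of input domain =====

-- B replaces A's positional comparisons and adjacent-pair scan on the sorted dice by a frequency
-- table (dict) over the four smallest values, classified by its counts (objective: alternative).
-- Both A and B sort the argument list in place (same observable mutation); the equivalence proved here is about the return value.


-- ===== PORT A =====
-- A's body after `dice.sort()`; indexing is pyGetD (out of range = IndexError, excluded by Pre_).
def pvAfterSortA (s : List Int) : Int :=
  if PySem.List.pyGetD s 0 0 = PySem.List.pyGetD s 3 0 then
    50000 + PySem.List.pyGetD s 0 0 * 5000
  else if PySem.List.pyGetD s 0 0 = PySem.List.pyGetD s 2 0 ∨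
          PySem.List.pyGetD s 1 0 = PySem.List.pyGetD s 3 0 then
    10000 + PySem.List.pyGetD s 1 0 * 1000
  else if PySem.List.pyGetD s 0 0 = PySem.List.pyGetD s 1 0 ∧
          PySem.List.pyGetD s 2 0 = PySem.List.pyGetD s 3 0 then
    2000 + PySem.List.pyGetD s 0 0 * 500 + PySem.List.pyGetD s 2 0 * 500
  else
    -- for i in range(3): if dice[i] == dice[i+1]: return 1000 + dice[i] * 100
    match (PySem.List.pyRange 0 3 1).findSome? (fun i =>
      if PySem.List.pyGetD s i 0 = PySem.List.pyGetD s (i + 1) 0 then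
        some (1000 + PySem.List.pyGetD s i 0 * 100)
      else none) with
    | some r => r
    | none => PySem.List.pyGetD s 3 0 * 100

def calculate_prize (dice : List Int) : Int :=
  pvAfterSortA (PySem.List.sorted dice (fun x => x) false)

-- ===== PORT B =====
-- B's `for v, k in counts.items()` loop with its early returns and the `pairs` accumulator.
def pvClassify (items : List (Int × Int)) (pairs : List Int) (top : List Int) : Int :=
  match items with
  | [] =>
    if PySem.List.len pairs = 2 then
      2000 + (PySem.List.pyGetD pairs 0 0 + PySem.List.pyGetD pairs 1 0) * 500
    else if PySem.List.len pairs = 1 then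
      1000 + PySem.List.pyGetD pairs 0 0 * 100
    else
      PySem.List.pyGetD top 3 0 * 100
  | (v, k) :: rest =>
    if k = 4 then 50000 + v * 5000
    else if k = 3 then 10000 + v * 1000
    else if k = 2 then pvClassify rest (pairs ++ [v]) top
    else pvClassify rest pairs top

def calculate_prize_alt (dice : List Int) : Int :=
  let s := PySem.List.sorted dice (fun x => x) false
  let top := PySem.List.slice s none (some 4)
  let counts := top.foldl (fun d v => d.insert v (d.getD v 0 + 1))
    (PySem.Dict.empty : PySem.Dict Int Int)
  pvClassify counts.items [] top

-- ===== PRECONDITION & SPEC =====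
-- A raises IndexError when the list has fewer than four elements; Pre_ excludes exactly those inputs.
def Pre_calculate_prize (dice : List Int) : Prop := 4 ≤ dice.length
instance (dice : List Int) : Decidable (Pre_calculate_prize dice) := by
  unfold Pre_calculate_prize; infer_instance

def pvWitness_calculate_prize : List Int := [3, 1, 3, 6]

def Spec_calculate_prize (dice : List Int) (out : Int) : Prop := out = calculate_prize_alt dice
instance (dice : List Int) (out : Int) : Decidable (Spec_calculate_prize dice out) := by
  unfold Spec_calculate_prize; infer_instance

-- ===== CLAIM (what is proved, stated in full; the proofs are below) =====
def Claim_equal_calculate_prize : Prop :=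
  ∀ (dice : List Int), Dom_calculate_prize dice → Pre_calculate_prize dice →
    Spec_calculate_prize dice (calculate_prize dice)

-- ===== LEMMAS AND PROOFS =====

theorem pvG0 (x0 x1 x2 x3 : Int) (r : List Int) :
    PySem.List.pyGetD (x0 :: x1 :: x2 :: x3 :: r) 0 0 = x0 := by simp [pysem]
theorem pvG1 (x0 x1 x2 x3 : Int) (r : List Int) :
    PySem.List.pyGetD (x0 :: x1 :: x2 :: x3 :: r) 1 0 = x1 := by simp [pysem]
theorem pvG2 (x0 x1 x2 x3 : Int) (r : List Int) :
    PySem.List.pyGetD (x0 :: x1 :: x2 :: x3 :: r) 2 0 = x2 := by simp [pysem]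
theorem pvG3 (x0 x1 x2 x3 : Int) (r : List Int) :
    PySem.List.pyGetD (x0 :: x1 :: x2 :: x3 :: r) 3 0 = x3 := by simp [pysem]
theorem pvR3 : PySem.List.pyRange 0 3 1 = [0, 1, 2] := by decide

-- A's body on a sorted 4+-list, as a plain decision tree on the first four elements.
theorem pvA_eval (s0 s1 s2 s3 : Int) (r : List Int) :
    pvAfterSortA (s0 :: s1 :: s2 :: s3 :: r) =
      if s0 = s3 then 50000 + s0 * 5000
      else if s0 = s2 ∨ s1 = s3 then 10000 + s1 * 1000
      else if s0 = s1 ∧ s2 = s3 then 2000 + s0 * 500 + s2 * 500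
      else if s0 = s1 then 1000 + s0 * 100
      else if s1 = s2 then 1000 + s1 * 100
      else if s2 = s3 then 1000 + s2 * 100
      else s3 * 100 := by
  unfold pvAfterSortA
  rw [pvR3]
  simp only [List.findSome?, pvG0, pvG1, pvG2, pvG3]
  norm_num [pvG0, pvG1, pvG2, pvG3]
  split_ifs <;> simp_all

-- The two bodies agree on any nondecreasing four prefix.
theorem pv_bodies_eq (a b c d : Int) (rest : List Int)
    (h1 : a ≤ b) (h2 : b ≤ c) (h3 : c ≤ d) :
    pvAfterSortA (a :: b :: c :: d :: rest) =
      pvClassify (([a, b, c, d].foldl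
        (fun (dd : PySem.Dict Int Int) v => dd.insert v (dd.getD v 0 + 1))
        PySem.Dict.empty).items) [] [a, b, c, d] := by
  rw [pvA_eval]
  by_cases hab : a = b <;> by_cases hbc : b = c <;> by_cases hcd : c = d
  · -- a = b = c = d
    subst hab hbc hcd
    have hit : (([a, a, a, a].foldl
        (fun (dd : PySem.Dict Int Int) v => dd.insert v (dd.getD v 0 + 1))
        PySem.Dict.empty).items) = [(a, 4)] := by
      rw [PySem.Dict.foldl_insert_getD_add_one_eq_counter, PySem.Dict.items_counter]
      simp [PySem.Set.ofList, PySem.Set.add, List.count_cons]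
    rw [hit]; norm_num [pvClassify]
  · -- a = b = c ≠ d
    subst hab hbc
    have had : ¬ a = d := hcd
    have hit : (([a, a, a, d].foldl
        (fun (dd : PySem.Dict Int Int) v => dd.insert v (dd.getD v 0 + 1))
        PySem.Dict.empty).items) = [(a, 3), (d, 1)] := by
      rw [PySem.Dict.foldl_insert_getD_add_one_eq_counter, PySem.Dict.items_counter]
      simp [PySem.Set.ofList, PySem.Set.add, had, Ne.symm had, List.count_cons]
    rw [hit]; norm_num [pvClassify, had]
  · -- a = b ≠ c = d
    subst hab hcd
    have hac : ¬ a = c := hbc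
    have hit : (([a, a, c, c].foldl
        (fun (dd : PySem.Dict Int Int) v => dd.insert v (dd.getD v 0 + 1))
        PySem.Dict.empty).items) = [(a, 2), (c, 2)] := by
      rw [PySem.Dict.foldl_insert_getD_add_one_eq_counter, PySem.Dict.items_counter]
      simp [PySem.Set.ofList, PySem.Set.add, hac, Ne.symm hac, List.count_cons]
    rw [hit]; norm_num [pvClassify, hac, pysem]; ring
  · -- a = b, b < c < d
    subst hab
    have hac : ¬ a = c := hbc
    have had : ¬ a = d := by omega
    have hit : (([a, a, c, d].foldl
        (fun (dd : PySem.Dict Int Int) v => dd.insert v (dd.getD v 0 + 1))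
        PySem.Dict.empty).items) = [(a, 2), (c, 1), (d, 1)] := by
      rw [PySem.Dict.foldl_insert_getD_add_one_eq_counter, PySem.Dict.items_counter]
      simp [PySem.Set.ofList, PySem.Set.add, hac, Ne.symm hac, had, Ne.symm had,
        hcd, Ne.symm hcd, List.count_cons]
    rw [hit]; norm_num [pvClassify, hac, had, hcd, pysem]
  · -- a < b = c = d
    subst hbc hcd
    have hab' : ¬ a = b := hab
    have hit : (([a, b, b, b].foldl
        (fun (dd : PySem.Dict Int Int) v => dd.insert v (dd.getD v 0 + 1))
        PySem.Dict.empty).items) = [(a, 1), (b, 3)] := by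
      rw [PySem.Dict.foldl_insert_getD_add_one_eq_counter, PySem.Dict.items_counter]
      simp [PySem.Set.ofList, PySem.Set.add, hab', Ne.symm hab', List.count_cons]
    rw [hit]; norm_num [pvClassify, hab']
  · -- a < b = c < d
    subst hbc
    have had : ¬ a = d := by omega
    have hbd : ¬ b = d := hcd
    have hit : (([a, b, b, d].foldl
        (fun (dd : PySem.Dict Int Int) v => dd.insert v (dd.getD v 0 + 1))
        PySem.Dict.empty).items) = [(a, 1), (b, 2), (d, 1)] := by
      rw [PySem.Dict.foldl_insert_getD_add_one_eq_counter, PySem.Dict.items_counter]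
      simp [PySem.Set.ofList, PySem.Set.add, hab, Ne.symm hab, had, Ne.symm had,
        hbd, Ne.symm hbd, List.count_cons]
    rw [hit]; norm_num [pvClassify, hab, had, hbd, pysem]
  · -- a < b < c = d
    subst hcd
    have hac : ¬ a = c := by omega
    have hit : (([a, b, c, c].foldl
        (fun (dd : PySem.Dict Int Int) v => dd.insert v (dd.getD v 0 + 1))
        PySem.Dict.empty).items) = [(a, 1), (b, 1), (c, 2)] := by
      rw [PySem.Dict.foldl_insert_getD_add_one_eq_counter, PySem.Dict.items_counter]
      simp [PySem.Set.ofList, PySem.Set.add, hab, Ne.symm hab, hac, Ne.symm hac,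
        hbc, Ne.symm hbc, List.count_cons]
    rw [hit]; norm_num [pvClassify, hab, hac, hbc, pysem]
  · -- all distinct
    have hac : ¬ a = c := by omega
    have had : ¬ a = d := by omega
    have hbd : ¬ b = d := by omega
    have hit : (([a, b, c, d].foldl
        (fun (dd : PySem.Dict Int Int) v => dd.insert v (dd.getD v 0 + 1))
        PySem.Dict.empty).items) = [(a, 1), (b, 1), (c, 1), (d, 1)] := by
      rw [PySem.Dict.foldl_insert_getD_add_one_eq_counter, PySem.Dict.items_counter]
      simp [PySem.Set.ofList, PySem.Set.add, hab, Ne.symm hab, hac, Ne.symm hac,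
        had, Ne.symm had, hbc, Ne.symm hbc, hbd, Ne.symm hbd, hcd, Ne.symm hcd,
        List.count_cons]
    rw [hit]; norm_num [pvClassify, hab, hac, had, hbc, hbd, hcd, pysem]; rfl

theorem pv_main (s : List Int) (hlen : 4 ≤ s.length)
    (hpw : List.Pairwise (fun x y : Int => x ≤ y) s) :
    pvAfterSortA s =
      pvClassify (((PySem.List.slice s none (some 4)).foldl
        (fun (dd : PySem.Dict Int Int) v => dd.insert v (dd.getD v 0 + 1))
        PySem.Dict.empty).items) [] (PySem.List.slice s none (some 4)) := by
  match s, hlen with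
  | a :: b :: c :: d :: rest, _ =>
    have hsl : PySem.List.slice (a :: b :: c :: d :: rest) none (some 4) = [a, b, c, d] := by
      rw [show ((4:Int)) = ((4:Nat):Int) by norm_num, PySem.List.slice_to_natCast]
      simp [List.take]
    rw [hsl]
    simp only [List.pairwise_cons] at hpw
    exact pv_bodies_eq a b c d rest (hpw.1 b (by simp)) (hpw.2.1 c (by simp))
      (hpw.2.2.1 d (by simp))

-- ===== VERDICT (by name: the statement is the Claim_ definition above) =====
theorem calculate_prize_spec : Claim_equal_calculate_prize := by
  intro dice _ hpre
  unfold Spec_calculate_prize calculate_prize calculate_prize_alt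
  exact pv_main (PySem.List.sorted dice (fun x => x) false)
    (by rw [PySem.List.length_sorted]; exact hpre)
    (PySem.List.sorted_pairwise dice (fun x => x))
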